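-- pv_equiv track=rewrite | github.com/GabrielFonseca13/trybe-exercicios | CS/Bloco_02_Algoritmos/dia_2_2/ex_pos_aula/ex3.py | maior_inteiro_aux
-- ===== SOURCE A (Python) =====
-- def maior_inteiro_aux(list, size):
--     if size == 1:
--         return list[0]
--     else:
--         maior_do_resto_da_lista = maior_inteiro_aux(list, size - 1)
--         if maior_do_resto_da_lista > list[size - 1]:
--             return maior_do_resto_da_lista
--         else:
--             return list[size - 1]
-- ===== SOURCE B (Python) =====
-- def maior_inteiro_aux(list, size):
--     maior = list[0]
--     for i in range(1, size):
--         if list[i] > maior: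
--             maior = list[i]
--     return maior
-- ===== Notes on version B (the rewrite author's own statement) =====
-- stated objective: idiomatic
-- what changed: Replaced the right-to-left recursion on size with an iterative left-to-right loop keeping a running maximum (maior = list[0]; update over range(1, size)).
import Mathlib
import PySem

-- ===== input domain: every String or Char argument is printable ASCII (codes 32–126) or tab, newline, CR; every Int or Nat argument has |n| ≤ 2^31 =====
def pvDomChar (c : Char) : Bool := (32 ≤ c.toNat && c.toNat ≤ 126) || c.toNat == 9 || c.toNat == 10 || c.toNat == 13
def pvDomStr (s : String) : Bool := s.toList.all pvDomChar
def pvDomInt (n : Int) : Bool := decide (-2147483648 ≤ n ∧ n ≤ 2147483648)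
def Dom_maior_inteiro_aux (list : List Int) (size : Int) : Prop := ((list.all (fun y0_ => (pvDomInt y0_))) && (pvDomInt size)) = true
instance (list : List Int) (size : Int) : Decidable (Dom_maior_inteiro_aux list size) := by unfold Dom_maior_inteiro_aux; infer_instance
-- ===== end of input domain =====

-- B replaces A's right-to-left recursion on size by an iterative left-to-right running-maximum loop (idiomatic; same cost, O(1) space).

-- ===== PORT A =====
-- recursion on size, transcribed as structural recursion on the fuel size.toNat;
-- the 0 case (size ≤ 0) is unreachable under Pre_ (Python recurses without bound there, RecursionError)
def maiorA (list : List Int) : Nat → Int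
  | 0 => 0
  | 1 => (PySem.List.pyGet? list 0).getD 0
  | n + 2 =>
      let maior_do_resto_da_lista := maiorA list (n + 1)
      let last := (PySem.List.pyGet? list ((n : Int) + 1)).getD 0
      if maior_do_resto_da_lista > last then maior_do_resto_da_lista else last

def maior_inteiro_aux (list : List Int) (size : Int) : Int := maiorA list size.toNat

-- ===== PORT B =====
def maior_inteiro_aux_alt (list : List Int) (size : Int) : Int :=
  (PySem.List.pyRange 1 size 1).foldl
    (fun maior i =>
      let x := (PySem.List.pyGet? list i).getD 0
      if x > maior then x else maior)
    ((PySem.List.pyGet? list 0).getD 0)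

-- ===== PRECONDITION & SPEC =====
-- Pre_: exactly the inputs on which the Python A returns: 1 ≤ size ≤ len(list)
-- (size ≤ 0 → RecursionError; size > len(list) → IndexError).
def Pre_maior_inteiro_aux (list : List Int) (size : Int) : Prop := 1 ≤ size ∧ size ≤ list.length
instance (list : List Int) (size : Int) : Decidable (Pre_maior_inteiro_aux list size) := by unfold Pre_maior_inteiro_aux; infer_instance
def pvWitness_maior_inteiro_aux : List Int × Int := ([1, 3, 2], 3)
def Spec_maior_inteiro_aux (list : List Int) (size : Int) (out : Int) : Prop := out = maior_inteiro_aux_alt list size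
instance (list : List Int) (size : Int) (out : Int) : Decidable (Spec_maior_inteiro_aux list size out) := by unfold Spec_maior_inteiro_aux; infer_instance

-- ===== CLAIM (what is proved, stated in full; the proofs are below) =====
def Claim_equal_maior_inteiro_aux : Prop := ∀ (list : List Int) (size : Int), Dom_maior_inteiro_aux list size → Pre_maior_inteiro_aux list size → Spec_maior_inteiro_aux list size (maior_inteiro_aux list size)

-- ===== LEMMAS AND PROOFS =====

theorem maiorA_eq_fold (list : List Int) (n : Nat) (h1 : 1 ≤ n) :
    maiorA list n = (PySem.List.pyRange 1 (n : Int) 1).foldl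
      (fun maior i =>
        let x := (PySem.List.pyGet? list i).getD 0
        if x > maior then x else maior)
      ((PySem.List.pyGet? list 0).getD 0) := by
  induction n with
  | zero => omega
  | succ m ih =>
    match m, ih with
    | 0, _ =>
      simp [maiorA, PySem.List.pyRange_one_eq_nil (by omega : (1:Int) ≤ 1)]
    | k + 1, ih =>
      have hk : (1:Int) ≤ (k:Int) + 1 := by omega
      have hsplit : PySem.List.pyRange 1 ((k + 2 : Nat) : Int) 1
          = PySem.List.pyRange 1 ((k:Int) + 1) 1 ++ [(k:Int) + 1] := by
        have := PySem.List.pyRange_one_succ_right (a := 1) (b := (k:Int) + 1) hk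
        push_cast
        convert this using 2 <;> push_cast <;> ring
      rw [hsplit, List.foldl_append]
      have ih' := ih (by omega)
      push_cast at ih'
      simp only [maiorA, ih', List.foldl_cons, List.foldl_nil]
      split_ifs <;> omega

-- ===== VERDICT (by name: the statement is the Claim_ definition above) =====
theorem maior_inteiro_aux_spec : Claim_equal_maior_inteiro_aux := by
  intro list size _ hpre
  obtain ⟨h1, _⟩ := hpre
  unfold Spec_maior_inteiro_aux maior_inteiro_aux maior_inteiro_aux_alt
  have hn : (size.toNat : Int) = size := Int.toNat_of_nonneg (by omega)
  rw [maiorA_eq_fold list size.toNat (by omega), hn]
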